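-- pv_equiv track=rewrite | github.com/Kaysera/teacher | flore/explanation/tests/test_counterfactual.py | _compare_rule
-- ===== SOURCE A (Python) =====
-- def _compare_rule(explanation, counter_rule):
--     similarities = 0
--     ex = {}
--     cr = {}
--
--     for elem in explanation:
--         ex[elem[0]] = elem[1]
--
--     for elem in counter_rule:
--         cr[elem[0]] = elem[1]
--
--     diffs = set([])
--
--     for elem in ex:
--         if elem in cr and ex[elem] == cr[elem]:
--             similarities += 1
--         else:
--             diffs.add(elem)
--
--     for elem in cr:
--         if elem in ex and ex[elem] == cr[elem]:
--             similarities += 1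
--         else:
--             diffs.add(elem)
--     return len(diffs)
-- ===== SOURCE B (Python) =====
-- def _compare_rule(explanation, counter_rule):
--     # Sorted-merge join: extract each list's effective (last-wins) bindings by a
--     # reverse scan, sort both by key, then count differing keys in one merge pass.
--     def bindings(pairs):
--         out = []
--         for k, v in reversed(pairs):
--             if all(k2 != k for k2, _ in out):
--                 out.append((k, v))
--         out.sort(key=lambda p: p[0])
--         return out
--
--     a = bindings(explanation)
--     b = bindings(counter_rule)
--     i = j = diffs = 0
--     while i < len(a) and j < len(b):
--         (ka, va), (kb, vb) = a[i], b[j]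
--         if ka < kb:
--             diffs += 1
--             i += 1
--         elif kb < ka:
--             diffs += 1
--             j += 1
--         else:
--             if va != vb:
--                 diffs += 1
--             i += 1
--             j += 1
--     return diffs + (len(a) - i) + (len(b) - j)
-- ===== Notes on version B (the rewrite author's own statement) =====
-- stated objective: alternative
-- what changed: A builds two hash dicts and collects differing keys into a set over two dict passes; B never builds a diff set or dict: it extracts each list's last-wins bindings by a reverse scan, sorts both binding lists by key, and counts differing keys in a single sorted-merge pass.
import Mathlib
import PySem

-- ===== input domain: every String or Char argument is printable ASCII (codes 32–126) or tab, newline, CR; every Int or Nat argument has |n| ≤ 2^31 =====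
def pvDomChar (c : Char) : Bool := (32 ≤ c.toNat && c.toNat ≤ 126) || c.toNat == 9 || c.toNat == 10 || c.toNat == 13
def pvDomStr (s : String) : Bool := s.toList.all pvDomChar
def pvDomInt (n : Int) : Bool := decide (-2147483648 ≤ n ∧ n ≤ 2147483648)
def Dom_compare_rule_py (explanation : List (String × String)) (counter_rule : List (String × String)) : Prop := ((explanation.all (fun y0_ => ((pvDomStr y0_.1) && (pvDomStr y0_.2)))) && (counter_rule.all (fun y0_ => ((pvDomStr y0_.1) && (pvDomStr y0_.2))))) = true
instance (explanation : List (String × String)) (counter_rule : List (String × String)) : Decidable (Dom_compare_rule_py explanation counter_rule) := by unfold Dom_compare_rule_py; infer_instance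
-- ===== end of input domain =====

-- B replaces A's dict-building and diff-set passes by a sorted-merge join: each list is
-- reduced to its last-wins bindings by a reverse scan, both are sorted by key, and a single
-- merge pass counts the differing keys (objective: alternative algorithm; same cost class).

-- ===== PORT A =====
-- the two Python dict-building loops: `for elem in …: d[elem[0]] = elem[1]`
def pvMkDict (l : List (String × String)) : PySem.Dict String String :=
  l.foldl (fun d p => d.insert p.1 p.2) PySem.Dict.empty

def compare_rule_py (explanation : List (String × String)) (counter_rule : List (String × String)) : Int :=
  let ex := pvMkDict explanation
  let cr := pvMkDict counter_rule
  -- `for elem in ex: …` / `for elem in cr: …` carrying (similarities, diffs)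
  let st1 : Int × PySem.Set String :=
    ex.keys.foldl (fun st k =>
      if cr.contains k && (ex.get? k == cr.get? k) then (st.1 + 1, st.2)
      else (st.1, PySem.Set.add st.2 k)) (0, PySem.Set.empty)
  let st2 : Int × PySem.Set String :=
    cr.keys.foldl (fun st k =>
      if ex.contains k && (ex.get? k == cr.get? k) then (st.1 + 1, st.2)
      else (st.1, PySem.Set.add st.2 k)) st1
  (st2.2.length : Int)

-- ===== PORT B =====
-- bindings(pairs): reverse scan keeping the first (i.e. last-wins) pair per key, then sort by key
def pvBindings (l : List (String × String)) : List (String × String) :=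
  PySem.List.sorted
    (l.reverse.foldl (fun out p =>
      if out.all (fun q => decide (q.1 ≠ p.1)) then out ++ [p] else out) [])
    (fun p => p.1) false

-- the while-loop over indices i, j as structural recursion on the two sorted lists
def pvMergeCount : List (String × String) → List (String × String) → Int
  | [], b => (b.length : Int)
  | a :: as, [] => ((a :: as).length : Int)
  | (ka, va) :: as, (kb, vb) :: bs =>
    if ka < kb then 1 + pvMergeCount as ((kb, vb) :: bs)
    else if kb < ka then 1 + pvMergeCount ((ka, va) :: as) bs
    else (if va ≠ vb then 1 else 0) + pvMergeCount as bs
  termination_by a b => a.length + b.length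

def compare_rule_py_alt (explanation : List (String × String)) (counter_rule : List (String × String)) : Int :=
  pvMergeCount (pvBindings explanation) (pvBindings counter_rule)

-- ===== PRECONDITION & SPEC =====
def Spec_compare_rule_py (explanation : List (String × String)) (counter_rule : List (String × String)) (out : Int) : Prop := out = compare_rule_py_alt explanation counter_rule
instance (explanation : List (String × String)) (counter_rule : List (String × String)) (out : Int) : Decidable (Spec_compare_rule_py explanation counter_rule out) := by unfold Spec_compare_rule_py; infer_instance

-- ===== CLAIM (what is proved, stated in full; the proofs are below) =====
def Claim_equal_compare_rule_py : Prop := ∀ (explanation : List (String × String)) (counter_rule : List (String × String)), Dom_compare_rule_py explanation counter_rule → Spec_compare_rule_py explanation counter_rule (compare_rule_py explanation counter_rule)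

-- ===== LEMMAS AND PROOFS =====

-- first-match lookup in an association list
def pvLk (k : String) (l : List (String × String)) : Option String :=
  (l.find? (fun q => q.1 == k)).map (·.2)

-- the common yardstick: number of keys of `a` whose binding is absent or different in `b`,
-- plus number of keys of `b` absent from `a`
def pvDN (a b : List (String × String)) : Nat :=
  a.countP (fun p => !(pvLk p.1 b == some p.2)) + b.countP (fun p => pvLk p.1 a == none)

theorem pvLk_nil (k : String) : pvLk k [] = none := rfl

theorem pvLk_cons (k : String) (p : String × String) (l : List (String × String)) :
    pvLk k (p :: l) = if p.1 = k then some p.2 else pvLk k l := by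
  simp only [pvLk, List.find?_cons]
  by_cases h : p.1 = k
  · simp [h]
  · have hb : (p.1 == k) = false := by simp [h]
    simp [hb, h]

theorem pvLk_singleton (k : String) (p : String × String) :
    pvLk k [p] = if p.1 = k then some p.2 else none := by
  rw [pvLk_cons, pvLk_nil]

theorem pvLk_append (k : String) (l₁ l₂ : List (String × String)) :
    pvLk k (l₁ ++ l₂) = (pvLk k l₁).or (pvLk k l₂) := by
  induction l₁ with
  | nil => simp [pvLk_nil]
  | cons p l ih =>
    rw [List.cons_append, pvLk_cons, pvLk_cons]
    by_cases h : p.1 = k <;> simp [h, ih]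

theorem pvLk_eq_none_iff (k : String) (l : List (String × String)) :
    pvLk k l = none ↔ k ∉ l.map Prod.fst := by
  induction l with
  | nil => simp [pvLk_nil]
  | cons p l ih =>
    rw [pvLk_cons]
    by_cases h : p.1 = k
    · simp [h]
    · have hk : ¬ k = p.1 := fun hk => h hk.symm
      rw [if_neg h, ih]
      simp [hk]

theorem pvLk_eq_some_iff (k v : String) (l : List (String × String))
    (hnd : (l.map Prod.fst).Nodup) :
    pvLk k l = some v ↔ (k, v) ∈ l := by
  induction l with
  | nil => simp [pvLk_nil]
  | cons p l ih =>
    simp only [List.map_cons, List.nodup_cons] at hnd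
    rw [pvLk_cons, List.mem_cons]
    by_cases h : p.1 = k
    · rw [if_pos h]
      constructor
      · intro hv
        left
        have hv2 : p.2 = v := by simpa using hv
        rw [← h, ← hv2]
      · rintro (rfl | hm)
        · simp
        · exact absurd (h ▸ List.mem_map_of_mem (f := Prod.fst) hm) hnd.1
    · rw [if_neg h, ih hnd.2]
      constructor
      · exact Or.inr
      · rintro (he | hm)
        · exact absurd (congrArg Prod.fst he).symm h
        · exact hm

theorem pvLk_perm (k : String) (l l' : List (String × String))
    (hp : l.Perm l') (hnd : (l.map Prod.fst).Nodup) :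
    pvLk k l = pvLk k l' := by
  have hnd' : (l'.map Prod.fst).Nodup := ((hp.map Prod.fst).nodup_iff).mp hnd
  cases h : pvLk k l with
  | none =>
    symm
    rw [pvLk_eq_none_iff] at h ⊢
    exact fun hm => h ((hp.map Prod.fst).mem_iff.mpr hm)
  | some v =>
    symm
    rw [pvLk_eq_some_iff _ _ _ hnd'] ; rw [pvLk_eq_some_iff _ _ _ hnd] at h
    exact hp.mem_iff.mp h

-- pvDN is invariant under permuting either list (keys unique)
theorem pvDN_perm (a a' b b' : List (String × String))
    (ha : a.Perm a') (hb : b.Perm b')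
    (hna : (a.map Prod.fst).Nodup) (hnb : (b.map Prod.fst).Nodup) :
    pvDN a b = pvDN a' b' := by
  unfold pvDN
  have h1 : a.countP (fun p => !(pvLk p.1 b == some p.2))
      = a'.countP (fun p => !(pvLk p.1 b' == some p.2)) := by
    rw [ha.countP_eq]
    apply List.countP_congr
    intro p _
    rw [pvLk_perm p.1 b b' hb hnb]
  have h2 : b.countP (fun p => pvLk p.1 a == none)
      = b'.countP (fun p => pvLk p.1 a' == none) := by
    rw [hb.countP_eq]
    apply List.countP_congr
    intro p _
    rw [pvLk_perm p.1 a a' ha hna]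
  omega

-- ===== A-side: compare_rule_py equals pvDN over the dicts' items =====

-- `get?` of the insertion fold is first-match lookup in the reversed pair list
theorem pvMkDict_get?_aux (l : List (String × String)) (d : PySem.Dict String String) (k : String) :
    (l.foldl (fun d p => d.insert p.1 p.2) d).get? k = (pvLk k l.reverse).or (d.get? k) := by
  induction l generalizing d with
  | nil => simp [pvLk_nil]
  | cons p l ih =>
    rw [List.foldl_cons, ih, List.reverse_cons, pvLk_append, Option.or_assoc, pvLk_singleton,
        PySem.Dict.get?_insert]
    by_cases h : p.1 = k
    · simp [h]
    · have hk : ¬ k = p.1 := fun hk => h hk.symm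
      simp [h, hk]

theorem pvMkDict_get? (l : List (String × String)) (k : String) :
    (pvMkDict l).get? k = pvLk k l.reverse := by
  rw [pvMkDict, pvMkDict_get?_aux]
  simp [PySem.Dict.empty, PySem.Dict.get?]

theorem pvMkDict_nodup_keys (l : List (String × String)) :
    ((pvMkDict l).items.map Prod.fst).Nodup :=
  PySem.Dict.nodup_keys_foldl_insert_key l Prod.fst (fun _ p => p.2) _ (by simp [PySem.Dict.empty])

theorem pvLk_items (d : PySem.Dict String String) (k : String) :
    pvLk k d.items = d.get? k := by
  cases d with
  | mk l =>
    induction l with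
    | nil => rfl
    | cons p l ih =>
      rw [show (PySem.Dict.mk (p :: l)).items = p :: l from rfl,
          pvLk_cons, PySem.Dict.get?_mk_cons]
      by_cases h : p.1 = k
      · simp [h]
      · have hb : (p.1 == k) = false := by simp [h]
        rw [if_neg h, hb, if_neg (by simp)]
        exact ih

-- the second component of A's (similarities, diffs) fold ignores the first
theorem pv_foldl_pair_snd (l : List String) (p : String → Bool) (st : Int × PySem.Set String) :
    (l.foldl (fun st k => if p k then (st.1 + 1, st.2) else (st.1, PySem.Set.add st.2 k)) st).2
      = l.foldl (fun s k => if p k then s else PySem.Set.add s k) st.2 := by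
  induction l generalizing st with
  | nil => rfl
  | cons a l ih => simp only [List.foldl_cons]; split <;> exact ih _

-- A's filtered set-accumulating loop on a duplicate-free list appends exactly the new non-matching keys
theorem pv_foldl_add_filter (l : List String) (p : String → Bool) (s : List String)
    (hl : l.Nodup) (hs : s.Nodup) :
    l.foldl (fun s k => if p k then s else PySem.Set.add s k) s
      = s ++ l.filter (fun k => !p k && !s.contains k) := by
  induction l generalizing s with
  | nil => simp
  | cons a l ih =>
    rcases List.nodup_cons.mp hl with ⟨ha, hl'⟩
    simp only [List.foldl_cons, List.filter_cons]
    by_cases hp : p a = true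
    · simp [hp, ih _ hl' hs]
    · simp only [hp]
      by_cases hmem : a ∈ s
      · have h1 : PySem.Set.add s a = s := PySem.Set.add_of_mem hmem
        simp [ih _ hl' hs, hmem]
      · have hnd : (s ++ [a]).Nodup := by
          rw [← List.concat_eq_append]; exact List.Nodup.concat hmem hs
        have hcong : l.filter (fun k => !p k && (!decide (k ∈ s) && !decide (k = a)))
            = l.filter (fun k => !p k && !decide (k ∈ s)) := by
          apply List.filter_congr
          intro k hk
          have hne : k ≠ a := fun h => ha (h ▸ hk)
          simp [hne]
        simp [ih _ hl' hnd, hmem]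
        exact hcong

theorem pv_A_eq_pvDN (e c : List (String × String)) :
    compare_rule_py e c = (pvDN (pvMkDict e).items (pvMkDict c).items : Int) := by
  have hexK : (pvMkDict e).keys.Nodup := pvMkDict_nodup_keys e
  have hcrK : (pvMkDict c).keys.Nodup := pvMkDict_nodup_keys c
  simp only [compare_rule_py]
  rw [pv_foldl_pair_snd, pv_foldl_pair_snd]
  have hsnd : (((0 : Int), (PySem.Set.empty : PySem.Set String))).2
      = (PySem.Set.empty : PySem.Set String) := rfl
  rw [hsnd, pv_foldl_add_filter _ _ _ hexK (by simp [PySem.Set.empty])]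
  have hF1 : (PySem.Set.empty : PySem.Set String)
      ++ (pvMkDict e).keys.filter (fun k =>
          !((pvMkDict c).contains k && ((pvMkDict e).get? k == (pvMkDict c).get? k))
            && !List.contains (PySem.Set.empty : PySem.Set String) k)
      = (pvMkDict e).keys.filter (fun k =>
          !((pvMkDict c).contains k && ((pvMkDict e).get? k == (pvMkDict c).get? k))) := by
    rw [PySem.Set.empty]
    simp only [List.nil_append]
    apply List.filter_congr; intro k _; simp
  rw [hF1, pv_foldl_add_filter _ _ _ hcrK (hexK.filter _)]
  -- the second loop collects exactly the keys of cr that are absent from ex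
  have hF2 : (pvMkDict c).keys.filter (fun k =>
        !((pvMkDict e).contains k && ((pvMkDict e).get? k == (pvMkDict c).get? k))
          && !List.contains ((pvMkDict e).keys.filter (fun k =>
              !((pvMkDict c).contains k && ((pvMkDict e).get? k == (pvMkDict c).get? k)))) k)
      = (pvMkDict c).keys.filter (fun k => (pvMkDict e).get? k == none) := by
    apply List.filter_congr
    intro k hk
    have hck : (pvMkDict c).contains k = true := (PySem.Dict.contains_iff_mem_keys _ _).mpr hk
    cases hge : (pvMkDict e).get? k with
    | none =>
      have hec : (pvMkDict e).contains k = false := by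
        rw [PySem.Dict.contains_eq_isSome_get?, hge]; rfl
      have hkne : k ∉ (pvMkDict e).keys := fun hm =>
        by rw [(PySem.Dict.contains_iff_mem_keys _ _).mpr hm] at hec; cases hec
      have hnf : (List.contains ((pvMkDict e).keys.filter (fun k =>
          !((pvMkDict c).contains k && ((pvMkDict e).get? k == (pvMkDict c).get? k)))) k) = false := by
        simp only [List.contains_eq_mem, decide_eq_false_iff_not]
        exact fun hm => hkne (List.mem_of_mem_filter hm)
      rw [hec, hnf]
      simp
    | some v =>
      have hec : (pvMkDict e).contains k = true := by
        rw [PySem.Dict.contains_eq_isSome_get?, hge]; rfl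
      by_cases hv : ((pvMkDict e).get? k == (pvMkDict c).get? k) = true
      · rw [hge] at hv
        rw [hec, hv]
        simp
      · have hbf : ((pvMkDict e).get? k == (pvMkDict c).get? k) = false :=
          Bool.eq_false_iff.mpr hv
        rw [hge] at hbf
        have hkm : k ∈ (pvMkDict e).keys := (PySem.Dict.contains_iff_mem_keys _ _).mp hec
        have hmf : (List.contains ((pvMkDict e).keys.filter (fun k =>
            !((pvMkDict c).contains k && ((pvMkDict e).get? k == (pvMkDict c).get? k)))) k) = true := by
          simp only [List.contains_eq_mem, decide_eq_true_eq]
          exact List.mem_filter.mpr ⟨hkm, by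
            rw [hge]
            simp [hck, hbf]⟩
        rw [hec, hbf, hmf]
        simp
  rw [hF2]
  -- convert both filtered key lists into countP over the items
  unfold pvDN
  have hkeys_e : (pvMkDict e).keys = (pvMkDict e).items.map Prod.fst := rfl
  have hkeys_c : (pvMkDict c).keys = (pvMkDict c).items.map Prod.fst := rfl
  have hlen1 : ((pvMkDict e).keys.filter (fun k =>
        !((pvMkDict c).contains k && ((pvMkDict e).get? k == (pvMkDict c).get? k)))).length
      = (pvMkDict e).items.countP (fun p => !(pvLk p.1 (pvMkDict c).items == some p.2)) := by
    rw [← List.countP_eq_length_filter, hkeys_e, List.countP_map]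
    apply List.countP_congr
    intro p hp
    have hgp : (pvMkDict e).get? p.1 = some p.2 :=
      PySem.Dict.get?_of_mem_items (pvMkDict e) (by simpa using hp) hexK
    rw [Function.comp_apply, pvLk_items, hgp]
    cases hgc : (pvMkDict c).get? p.1 with
    | none =>
      have hcc : (pvMkDict c).contains p.1 = false := by
        rw [PySem.Dict.contains_eq_isSome_get?, hgc]; rfl
      rw [hcc]
      exact ⟨fun _ => rfl, fun _ => rfl⟩
    | some w =>
      have hcc : (pvMkDict c).contains p.1 = true := by
        rw [PySem.Dict.contains_eq_isSome_get?, hgc]; rfl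
      have hswap : ((some p.2 : Option String) == some w) = (some w == some p.2) := by
        simp [eq_comm]
      rw [hcc, hswap]
      exact Iff.rfl
  have hlen2 : ((pvMkDict c).keys.filter (fun k => (pvMkDict e).get? k == none)).length
      = (pvMkDict c).items.countP (fun p => pvLk p.1 (pvMkDict e).items == none) := by
    rw [← List.countP_eq_length_filter, hkeys_c, List.countP_map]
    apply List.countP_congr
    intro p hp
    rw [Function.comp_apply, pvLk_items]
  rw [List.length_append, hlen1, hlen2]

-- ===== B-side: pvBindings is a permutation of the dict's items, with strictly sorted keys =====

-- the reverse-scan fold, named for the proofs (pvBindings l = sorted (pvScan l.reverse) by key)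
def pvScan (l : List (String × String)) : List (String × String) :=
  l.foldl (fun out p => if out.all (fun q => decide (q.1 ≠ p.1)) then out ++ [p] else out) []

theorem pvBindings_eq (l : List (String × String)) :
    pvBindings l = PySem.List.sorted (pvScan l.reverse) (fun p => p.1) false := rfl

theorem pvScan_aux_lk (l : List (String × String)) (out : List (String × String)) (k : String) :
    pvLk k (l.foldl (fun out p => if out.all (fun q => decide (q.1 ≠ p.1)) then out ++ [p] else out) out)
      = (pvLk k out).or (pvLk k l) := by
  induction l generalizing out with
  | nil => simp [pvLk_nil]
  | cons p l ih =>
    rw [List.foldl_cons, ih]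
    have hstep : pvLk k (if out.all (fun q => decide (q.1 ≠ p.1)) then out ++ [p] else out)
        = (pvLk k out).or (if p.1 = k then some p.2 else none) := by
      by_cases hf : out.all (fun q => decide (q.1 ≠ p.1))
      · rw [if_pos hf, pvLk_append, pvLk_singleton]
      · rw [if_neg hf]
        have hmem : p.1 ∈ out.map Prod.fst := by
          by_contra hm
          apply hf
          simp only [List.all_eq_true, decide_eq_true_eq]
          intro q hq he
          exact hm (he ▸ List.mem_map_of_mem (f := Prod.fst) hq)
        by_cases hk : p.1 = k
        · subst hk
          cases ho : pvLk p.1 out with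
          | none => exact absurd hmem ((pvLk_eq_none_iff _ _).mp ho)
          | some w => simp
        · simp [hk]
    rw [hstep, Option.or_assoc, pvLk_cons]
    by_cases h : p.1 = k
    · simp [h]
    · simp [h]

theorem pvScan_lk (l : List (String × String)) (k : String) :
    pvLk k (pvScan l) = pvLk k l := by
  rw [pvScan, pvScan_aux_lk, pvLk_nil, Option.none_or]

theorem pvScan_aux_nodup (l : List (String × String)) (out : List (String × String))
    (h : (out.map Prod.fst).Nodup) :
    ((l.foldl (fun out p => if out.all (fun q => decide (q.1 ≠ p.1)) then out ++ [p] else out) out).map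
      Prod.fst).Nodup := by
  induction l generalizing out with
  | nil => exact h
  | cons p l ih =>
    rw [List.foldl_cons]
    apply ih
    by_cases hf : out.all (fun q => decide (q.1 ≠ p.1))
    · rw [if_pos hf, List.map_append]
      simp only [List.all_eq_true, decide_eq_true_eq] at hf
      have : p.1 ∉ out.map Prod.fst := by
        intro hm
        rcases List.mem_map.mp hm with ⟨q, hq, hqe⟩
        exact hf q hq hqe
      simpa using List.Nodup.append h (List.nodup_singleton _) (by simpa [List.disjoint_singleton])
    · rw [if_neg hf]; exact h

theorem pvScan_nodup (l : List (String × String)) : ((pvScan l).map Prod.fst).Nodup :=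
  pvScan_aux_nodup l [] (by simp)

theorem pv_bindings_nodup_keys (l : List (String × String)) :
    ((pvBindings l).map Prod.fst).Nodup := by
  rw [pvBindings_eq]
  exact (((PySem.List.sorted_perm (pvScan l.reverse) (fun p => p.1) false).map
    Prod.fst).nodup_iff).mpr (pvScan_nodup l.reverse)

theorem pv_bindings_perm_items (l : List (String × String)) :
    (pvBindings l).Perm (pvMkDict l).items := by
  have h1 : (pvBindings l).Perm (pvScan l.reverse) := by
    rw [pvBindings_eq]; exact PySem.List.sorted_perm _ _ _
  have hnS : ((pvScan l.reverse).map Prod.fst).Nodup := pvScan_nodup l.reverse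
  have hnI : ((pvMkDict l).items.map Prod.fst).Nodup := pvMkDict_nodup_keys l
  have h2 : (pvScan l.reverse).Perm (pvMkDict l).items := by
    rw [List.perm_ext_iff_of_nodup hnS.of_map hnI.of_map]
    rintro ⟨k, v⟩
    rw [← pvLk_eq_some_iff k v _ hnS, ← pvLk_eq_some_iff k v _ hnI,
        pvScan_lk, ← pvMkDict_get? l k, pvLk_items]
  exact h1.trans h2

theorem pv_bindings_sorted_lt (l : List (String × String)) :
    (pvBindings l).Pairwise (fun p q => p.1 < q.1) := by
  have hle : (pvBindings l).Pairwise (fun p q => p.1 ≤ q.1) := by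
    rw [pvBindings_eq]
    exact PySem.List.sorted_pairwise _ _
  have hne : (pvBindings l).Pairwise (fun p q => p.1 ≠ q.1) :=
    List.pairwise_map.mp (pv_bindings_nodup_keys l)
  exact (hle.and hne).imp (fun h => lt_of_le_of_ne h.1 h.2)

-- ===== merge correctness: on key-strictly-sorted lists the merge counts pvDN =====

theorem pv_merge_eq_pvDN (a b : List (String × String))
    (ha : a.Pairwise (fun p q => p.1 < q.1)) (hb : b.Pairwise (fun p q => p.1 < q.1)) :
    pvMergeCount a b = (pvDN a b : Int) := by
  induction a, b using pvMergeCount.induct with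
  | case1 b =>
    simp [pvMergeCount, pvDN, pvLk_nil]
  | case2 p as =>
    simp [pvMergeCount, pvDN, pvLk_nil]
  | case3 ka va as kb vb bs h1 ih =>
    rcases List.pairwise_cons.mp ha with ⟨hha, hta⟩
    rcases List.pairwise_cons.mp hb with ⟨hhb, htb⟩
    have hblt : ∀ q ∈ (kb, vb) :: bs, ka < q.1 := by
      intro q hq
      rcases List.mem_cons.mp hq with rfl | hq'
      · exact h1
      · exact h1.trans (hhb q hq')
    have hkanb : pvLk ka ((kb, vb) :: bs) = none := by
      rw [pvLk_eq_none_iff]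
      intro hm
      rcases List.mem_map.mp hm with ⟨q, hq, hqe⟩
      exact absurd (hqe ▸ hblt q hq) (lt_irrefl ka)
    have hc2 : ((kb, vb) :: bs).countP (fun p => pvLk p.1 ((ka, va) :: as) == none)
        = ((kb, vb) :: bs).countP (fun p => pvLk p.1 as == none) := by
      apply List.countP_congr
      intro q hq
      rw [pvLk_cons, if_neg (fun he => absurd (he ▸ hblt q hq) (lt_irrefl _))]
    have hnat : pvDN ((ka, va) :: as) ((kb, vb) :: bs)
        = pvDN as ((kb, vb) :: bs) + 1 := by
      unfold pvDN
      rw [List.countP_cons, hc2]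
      simp [hkanb]
      omega
    rw [pvMergeCount, if_pos h1, ih hta hb, hnat]
    push_cast
    ring
  | case4 ka va as kb vb bs h1 h2 ih =>
    rcases List.pairwise_cons.mp ha with ⟨hha, hta⟩
    rcases List.pairwise_cons.mp hb with ⟨hhb, htb⟩
    have halt : ∀ q ∈ (ka, va) :: as, kb < q.1 := by
      intro q hq
      rcases List.mem_cons.mp hq with rfl | hq'
      · exact h2
      · exact h2.trans (hha q hq')
    have hkbna : pvLk kb ((ka, va) :: as) = none := by
      rw [pvLk_eq_none_iff]
      intro hm
      rcases List.mem_map.mp hm with ⟨q, hq, hqe⟩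
      exact absurd (hqe ▸ halt q hq) (lt_irrefl kb)
    have hc1 : ((ka, va) :: as).countP (fun p => !(pvLk p.1 ((kb, vb) :: bs) == some p.2))
        = ((ka, va) :: as).countP (fun p => !(pvLk p.1 bs == some p.2)) := by
      apply List.countP_congr
      intro q hq
      rw [pvLk_cons, if_neg (fun he => absurd (he ▸ halt q hq) (lt_irrefl _))]
    have hnat : pvDN ((ka, va) :: as) ((kb, vb) :: bs)
        = pvDN ((ka, va) :: as) bs + 1 := by
      unfold pvDN
      rw [hc1, List.countP_cons]
      simp [hkbna]
      omega
    rw [pvMergeCount, if_neg h1, if_pos h2, ih ha htb, hnat]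
    push_cast
    ring
  | case5 ka va as kb vb bs h1 h2 ih =>
    rcases List.pairwise_cons.mp ha with ⟨hha, hta⟩
    rcases List.pairwise_cons.mp hb with ⟨hhb, htb⟩
    have heq : ka = kb := le_antisymm (not_lt.mp h2) (not_lt.mp h1)
    subst heq
    have hc1 : as.countP (fun p => !(pvLk p.1 ((ka, vb) :: bs) == some p.2))
        = as.countP (fun p => !(pvLk p.1 bs == some p.2)) := by
      apply List.countP_congr
      intro q hq
      rw [pvLk_cons, if_neg (fun he => absurd (he ▸ hha q hq) (lt_irrefl _))]
    have hc2 : bs.countP (fun p => pvLk p.1 ((ka, va) :: as) == none)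
        = bs.countP (fun p => pvLk p.1 as == none) := by
      apply List.countP_congr
      intro q hq
      rw [pvLk_cons, if_neg (fun he => absurd (he ▸ hhb q hq) (lt_irrefl _))]
    have hheadb : pvLk ka ((ka, va) :: as) = some va := by
      rw [pvLk_cons, if_pos rfl]
    have hheada : pvLk ka ((ka, vb) :: bs) = some vb := by
      rw [pvLk_cons, if_pos rfl]
    have hnat : pvDN ((ka, va) :: as) ((ka, vb) :: bs)
        = pvDN as bs + (if va = vb then 0 else 1) := by
      unfold pvDN
      rw [List.countP_cons, List.countP_cons, hc1, hc2]
      by_cases hv : va = vb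
      · subst hv
        simp [hheada, hheadb]
      · simp [hheada, hheadb, hv, Ne.symm hv]
        omega
    rw [pvMergeCount, if_neg h1, if_neg h2, ih hta htb, hnat]
    by_cases hv : va = vb
    · simp [hv]
    · simp [hv]
      ring

-- ===== VERDICT (by name: the statement is the Claim_ definition above) =====
theorem compare_rule_py_spec : Claim_equal_compare_rule_py := by
  intro e c _
  unfold Spec_compare_rule_py compare_rule_py_alt
  rw [pv_A_eq_pvDN, pv_merge_eq_pvDN _ _ (pv_bindings_sorted_lt e) (pv_bindings_sorted_lt c),
      pvDN_perm (pvMkDict e).items (pvBindings e) (pvMkDict c).items (pvBindings c)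
        (pv_bindings_perm_items e).symm (pv_bindings_perm_items c).symm
        (pvMkDict_nodup_keys e) (pvMkDict_nodup_keys c)]
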